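-- pv_equiv track=rewrite | github.com/RylandGomez/CS-Arcade | Intro/3_Smooth_Sailing/12_Sort_by_Height.py | solution
-- ===== SOURCE A (Python) =====
-- def solution(a):
--     '''
--     EXPLANATION
--     -------------------------------------------------------------------
--     I made the problem as explicit for myself as possible. I created a
--     list of the people in the array by excluding the -1 values, then
--     sorted them. They will be added in that order later.
--     Then, I created a boolean array of the tree locations. This is the
--     same length as the original array, since we are not adding or
--     removing people.
--     Finally, I append either -1 (for trees) or the next person to the
--     initially empty answer list, and return it. I utilize the pop()
--     method to continually use the 0 index.
--     -------------------------------------------------------------------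
--     '''
--
--     people = [x for x in a if x != -1]
--     people.sort()
--     trees = [True if x == -1 else False for x in a]
--
--     answer = []
--     for boolean in trees:
--         if boolean == True:
--             answer.append(-1)
--         else:
--             answer.append(people.pop(0))
--     return answer
-- ===== SOURCE B (Python) =====
-- def solution(a):
--     idx = [i for i, x in enumerate(a) if x != -1]
--     vals = sorted(a[i] for i in idx)
--     result = list(a)
--     for i, v in zip(idx, vals):
--         result[i] = v
--     return result
-- ===== Notes on version B (the rewrite author's own statement) =====
-- stated objective: faster
-- what changed: A builds a boolean tree-mask and consumes a queue with people.pop(0) per element (quadratic shifting); B computes the non-(-1) index list and the sorted values once and writes them into a copy of the input, never touching the -1 slots.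
import Mathlib
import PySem

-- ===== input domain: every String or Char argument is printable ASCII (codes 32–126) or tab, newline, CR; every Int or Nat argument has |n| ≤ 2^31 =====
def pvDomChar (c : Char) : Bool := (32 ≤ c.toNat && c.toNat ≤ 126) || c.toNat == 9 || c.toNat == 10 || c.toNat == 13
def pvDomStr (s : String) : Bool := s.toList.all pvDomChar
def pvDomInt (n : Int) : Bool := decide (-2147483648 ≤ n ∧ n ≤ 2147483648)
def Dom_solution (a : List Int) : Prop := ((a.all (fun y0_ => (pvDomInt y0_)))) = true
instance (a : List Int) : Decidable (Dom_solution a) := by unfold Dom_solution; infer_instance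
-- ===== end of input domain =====

-- B replaces A's boolean tree-mask + per-element pop(0) queue by index/value lists
-- written into a copy of the input (objective: faster — pop(0) makes A quadratic; measured faster in a timing run).

-- ===== PORT A =====
def solution (a : List Int) : List Int :=
  -- people = [x for x in a if x != -1]; people.sort()
  let people := PySem.List.sorted (a.filter (fun x => x ≠ -1)) (fun x => x) false
  -- trees = [True if x == -1 else False for x in a]
  let trees := a.map (fun x => x == -1)
  -- answer = []; for boolean in trees: append -1 or people.pop(0)
  let st := trees.foldl (fun (st : List Int × List Int) b =>
      if b then (st.1 ++ [(-1 : Int)], st.2)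
      else match st.2 with
        | [] => (st.1 ++ [(-1 : Int)], st.2)  -- unreachable: people is never exhausted (pop(0) always succeeds)
        | p :: rest => (st.1 ++ [p], rest)) ([], people)
  st.1

-- ===== PORT B =====
-- idx = [i for i, x in enumerate(a) if x != -1]   (Nat counter; Python indices here are always ≥ 0, exact)
def idxAux : List Int → Nat → List Nat
  | [], _ => []
  | x :: t, i => if x ≠ -1 then i :: idxAux t (i + 1) else idxAux t (i + 1)

def solution_alt (a : List Int) : List Int :=
  let idx := idxAux a 0
  -- vals = sorted(a[i] for i in idx); every i ∈ idx is a valid index of a, so a[i] = a.getD i 0 (exact)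
  let vals := PySem.List.sorted (idx.map (fun i => a.getD i 0)) (fun x => x) false
  -- result = list(a); for i, v in zip(idx, vals): result[i] = v
  (idx.zip vals).foldl (fun r iv => r.set iv.1 iv.2) a

-- ===== PRECONDITION & SPEC =====
def Spec_solution (a : List Int) (out : List Int) : Prop := out = solution_alt a
instance (a : List Int) (out : List Int) : Decidable (Spec_solution a out) := by unfold Spec_solution; infer_instance

-- ===== CLAIM (what is proved, stated in full; the proofs are below) =====
def Claim_equal_solution : Prop := ∀ (a : List Int), Dom_solution a → Spec_solution a (solution a)

-- ===== LEMMAS AND PROOFS =====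

/-- Common characterisation: place the queue `ps` at the non-(-1) slots of `t`. -/
def fillPeople : List Int → List Int → List Int
  | [], _ => []
  | x :: t, ps =>
    if x = -1 then (-1 : Int) :: fillPeople t ps
    else match ps with
      | [] => (-1 : Int) :: fillPeople t []   -- unreachable when |ps| = #non-(-1) of t + 1
      | p :: rest => p :: fillPeople t rest

/-- Leftover queue after `fillPeople`. -/
def remPeople : List Int → List Int → List Int
  | [], ps => ps
  | x :: t, ps =>
    if x = -1 then remPeople t ps
    else match ps with
      | [] => remPeople t []
      | _ :: rest => remPeople t rest

lemma foldlA_eq (t : List Int) : ∀ (acc ps : List Int),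
    (t.map (fun x => x == -1)).foldl (fun (st : List Int × List Int) b =>
      if b then (st.1 ++ [(-1 : Int)], st.2)
      else match st.2 with
        | [] => (st.1 ++ [(-1 : Int)], st.2)
        | p :: rest => (st.1 ++ [p], rest)) (acc, ps)
      = (acc ++ fillPeople t ps, remPeople t ps) := by
  induction t with
  | nil => intro acc ps; simp [fillPeople, remPeople]
  | cons x t ih =>
    intro acc ps
    by_cases hx : x = -1
    · simp [hx, fillPeople, remPeople, List.foldl_cons, ih]
    · cases ps with
      | nil => simp [hx, fillPeople, remPeople, List.foldl_cons, ih]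
      | cons p rest => simp [hx, fillPeople, remPeople, List.foldl_cons, ih]

lemma solution_eq_fill (a : List Int) :
    solution a = fillPeople a
      (PySem.List.sorted (a.filter (fun x => x ≠ -1)) (fun x => x) false) := by
  simp [solution, foldlA_eq]

lemma idxAux_shift (t : List Int) : ∀ n : Nat, idxAux t (n + 1) = (idxAux t n).map (· + 1) := by
  induction t with
  | nil => intro n; simp [idxAux]
  | cons x t ih =>
    intro n
    by_cases hx : x = -1 <;> simp [idxAux, hx, ih]

lemma idxAux_getD (a : List Int) :
    (idxAux a 0).map (fun i => a.getD i 0) = a.filter (fun x => x ≠ -1) := by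
  induction a with
  | nil => simp [idxAux]
  | cons x t ih =>
    by_cases hx : x = -1
    · simpa [idxAux, hx, idxAux_shift, List.map_map, Function.comp] using ih
    · simpa [idxAux, hx, idxAux_shift, List.map_map, Function.comp] using ih

lemma foldl_set_shift (l : List (Nat × Int)) : ∀ (y : Int) (r : List Int),
    (l.map (fun iv => (iv.1 + 1, iv.2))).foldl (fun r iv => r.set iv.1 iv.2) (y :: r)
      = y :: l.foldl (fun r iv => r.set iv.1 iv.2) r := by
  induction l with
  | nil => intro y r; rfl
  | cons p l ih => intro y r; simp [List.foldl_cons, List.set, ih]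

lemma foldl_set_eq_fill (a : List Int) : ∀ (vals : List Int),
    vals.length = (idxAux a 0).length →
    ((idxAux a 0).zip vals).foldl (fun r iv => r.set iv.1 iv.2) a = fillPeople a vals := by
  induction a with
  | nil => intro vals _; simp [idxAux, fillPeople]
  | cons x t ih =>
    intro vals hlen
    by_cases hx : x = -1
    · rw [show idxAux (x :: t) 0 = (idxAux t 0).map (· + 1) by simp [idxAux, hx, idxAux_shift]] at hlen ⊢
      rw [List.zip_map_left]
      have : (Prod.map (· + 1) (id : Int → Int)) = (fun iv : Nat × Int => (iv.1 + 1, iv.2)) := by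
        funext iv; cases iv; rfl
      rw [this, foldl_set_shift, ih vals (by simpa using hlen)]
      simp [fillPeople, hx]
    · rw [show idxAux (x :: t) 0 = 0 :: (idxAux t 0).map (· + 1) by simp [idxAux, hx, idxAux_shift]] at hlen ⊢
      cases vals with
      | nil => simp at hlen
      | cons v rest =>
        simp only [List.zip_cons_cons, List.foldl_cons, List.set]
        rw [List.zip_map_left]
        have : (Prod.map (· + 1) (id : Int → Int)) = (fun iv : Nat × Int => (iv.1 + 1, iv.2)) := by
          funext iv; cases iv; rfl
        rw [this, foldl_set_shift, ih rest (by simpa using hlen)]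
        simp [fillPeople, hx]

lemma solution_alt_eq_fill (a : List Int) :
    solution_alt a = fillPeople a
      (PySem.List.sorted (a.filter (fun x => x ≠ -1)) (fun x => x) false) := by
  show ((idxAux a 0).zip _).foldl _ a = _
  rw [idxAux_getD]
  exact foldl_set_eq_fill a _ (by
    rw [PySem.List.length_sorted, ← idxAux_getD, List.length_map])

-- ===== VERDICT (by name: the statement is the Claim_ definition above) =====
theorem solution_spec : Claim_equal_solution := by
  intro a _
  show solution a = solution_alt a
  rw [solution_eq_fill, solution_alt_eq_fill]
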